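-- pv_equiv track=rewrite | github.com/HunterAviator/OmniRemote | custom_components/omniremote/ir_encoder.py | _encode_nec_extended
-- ===== SOURCE A (Python) =====
-- def _encode_nec_extended(address: int, command: int) -> list[int]:
--     """Encode NEC Extended protocol (16-bit address)."""
--     timings = []
--
--     # Leader
--     timings.extend([9000, 4500])
--
--     # Build data: address_lo, address_hi, command, ~command
--     data = [
--         address & 0xFF,
--         (address >> 8) & 0xFF,
--         command & 0xFF,
--         (~command) & 0xFF
--     ]
--
--     # Encode each bit (LSB first)
--     for byte in data:
--         for bit in range(8):
--             timings.append(562)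
--             if (byte >> bit) & 1:
--                 timings.append(1687)
--             else:
--                 timings.append(562)
--
--     # End mark
--     timings.append(562)
--
--     return timings
-- ===== SOURCE B (Python) =====
-- # Table-driven NEC extended encoder: a module-level lookup table maps each
-- # 4-bit nibble to its 8-element pulse chunk; the encoder just concatenates
-- # table entries (low nibble first, then high nibble of each data byte).
-- _NIBBLE = []
-- for _n in range(16):
--     _chunk = []
--     for _b in range(4):
--         _chunk += [562, 1687 if (_n >> _b) & 1 else 562]
--     _NIBBLE.append(_chunk)
--
--
-- def _encode_nec_extended(address: int, command: int) -> list[int]: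
--     """Encode NEC Extended protocol (16-bit address) via a nibble lookup table."""
--     out = [9000, 4500]
--     for byte in [address & 0xFF, (address >> 8) & 0xFF, command & 0xFF, (~command) & 0xFF]:
--         out += _NIBBLE[byte & 0xF] + _NIBBLE[byte >> 4]
--     return out + [562]
-- ===== Notes on version B (the rewrite author's own statement) =====
-- stated objective: alternative
-- what changed: B replaces A's per-bit computation inside nested byte/bit loops by a precomputed 16-entry nibble-to-pulse-chunk lookup table built once at module load; the encoder itself only concatenates two table entries per data byte (low nibble, then high nibble).
import Mathlib
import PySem

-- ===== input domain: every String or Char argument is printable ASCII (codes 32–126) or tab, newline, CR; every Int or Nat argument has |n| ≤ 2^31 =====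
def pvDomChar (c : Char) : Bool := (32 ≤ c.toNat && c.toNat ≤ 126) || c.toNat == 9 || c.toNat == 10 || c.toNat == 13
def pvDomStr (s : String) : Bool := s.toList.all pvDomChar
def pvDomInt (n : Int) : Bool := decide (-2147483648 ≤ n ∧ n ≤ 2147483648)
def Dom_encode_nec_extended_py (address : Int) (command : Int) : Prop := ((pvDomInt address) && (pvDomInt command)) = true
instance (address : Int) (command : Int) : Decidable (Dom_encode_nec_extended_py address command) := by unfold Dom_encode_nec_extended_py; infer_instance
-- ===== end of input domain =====

-- B replaces A's per-bit work in nested byte/bit loops by a precomputed nibble→pulse-chunk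
-- lookup table; per data byte it concatenates the low-nibble and high-nibble table entries
-- (alternative, table-driven decomposition; same asymptotic cost).

-- ===== PORT A =====
-- literal port of _encode_nec_extended: & is PySem.Int.band, >> on a nonnegative shift is >>>, ~ is Int.not
def encode_nec_extended_py (address : Int) (command : Int) : List Int :=
  let timings : List Int := []
  let timings := timings ++ [9000, 4500]
  let data : List Int := [PySem.Int.band address 255,
    PySem.Int.band (address >>> (8:Nat)) 255,
    PySem.Int.band command 255,
    PySem.Int.band (Int.not command) 255]
  let timings := data.foldl (fun (acc : List Int) (byte : Int) =>
    (PySem.List.pyRange 0 8 1).foldl (fun (acc2 : List Int) (bit : Int) =>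
      let acc2 := acc2 ++ [562]
      if PySem.Int.band (byte >>> bit.toNat) 1 ≠ 0 then acc2 ++ [1687] else acc2 ++ [562]) acc) timings
  timings ++ [562]

-- ===== PORT B =====
-- literal port of Source B's module-level table build (_NIBBLE)
def pvNibbleTable : List (List Int) :=
  (PySem.List.pyRange 0 16 1).foldl (fun (tbl : List (List Int)) (n : Int) =>
    tbl ++ [(PySem.List.pyRange 0 4 1).foldl (fun (c : List Int) (b : Int) =>
      c ++ [562, if PySem.Int.band (n >>> b.toNat) 1 ≠ 0 then 1687 else 562]) []]) []

-- literal port of Source B: _NIBBLE[i] is pyGet?; both indices always lie in [0,16) so the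
-- IndexError branch (none) is unreachable and .getD [] is exact
def encode_nec_extended_py_alt (address : Int) (command : Int) : List Int :=
  let out : List Int := [9000, 4500]
  let out := ([PySem.Int.band address 255,
    PySem.Int.band (address >>> (8:Nat)) 255,
    PySem.Int.band command 255,
    PySem.Int.band (Int.not command) 255]).foldl (fun (acc : List Int) (byte : Int) =>
      acc ++ ((PySem.List.pyGet? pvNibbleTable (PySem.Int.band byte 15)).getD []
              ++ (PySem.List.pyGet? pvNibbleTable (byte >>> (4:Nat))).getD [])) out
  out ++ [562]

-- ===== PRECONDITION & SPEC =====
def Spec_encode_nec_extended_py (address : Int) (command : Int) (out : List Int) : Prop := out = encode_nec_extended_py_alt address command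
instance (address : Int) (command : Int) (out : List Int) : Decidable (Spec_encode_nec_extended_py address command out) := by unfold Spec_encode_nec_extended_py; infer_instance

-- ===== CLAIM (what is proved, stated in full; the proofs are below) =====
def Claim_equal_encode_nec_extended_py : Prop := ∀ (address : Int) (command : Int), Dom_encode_nec_extended_py address command → Spec_encode_nec_extended_py address command (encode_nec_extended_py address command)

-- ===== LEMMAS AND PROOFS =====

-- Python's a & 0xFF is reduction mod 256 (two's complement), for every Int a.
theorem pv_band255 (a : Int) : PySem.Int.band a 255 = a % 256 := by
  unfold PySem.Int.band
  cases a with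
  | ofNat n =>
      simp only [Int.ofNat_eq_natCast, Nat.cast_nonneg, ↓reduceIte, Nat.ofNat_nonneg,
        Int.toNat_natCast, Int.reduceToNat]
      rw [Nat.and_two_pow_sub_one_eq_mod n 8]
      omega
  | negSucc n =>
      simp only [Int.negSucc_not_nonneg, ↓reduceIte, Nat.ofNat_nonneg, Int.reduceToNat]
      have h1 : (-Int.negSucc n - 1).toNat = n := by rw [Int.negSucc_eq]; omega
      rw [h1, Nat.and_comm, Nat.and_two_pow_sub_one_eq_mod n 8]
      have := Nat.mod_lt n (show 0 < 256 by norm_num)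
      rw [Int.negSucc_eq]
      omega

-- and a & 0xF is reduction mod 16
theorem pv_band15 (a : Int) : PySem.Int.band a 15 = a % 16 := by
  unfold PySem.Int.band
  cases a with
  | ofNat n =>
      simp only [Int.ofNat_eq_natCast, Nat.cast_nonneg, ↓reduceIte, Nat.ofNat_nonneg,
        Int.toNat_natCast, Int.reduceToNat]
      rw [Nat.and_two_pow_sub_one_eq_mod n 4]
      omega
  | negSucc n =>
      simp only [Int.negSucc_not_nonneg, ↓reduceIte, Nat.ofNat_nonneg, Int.reduceToNat]
      have h1 : (-Int.negSucc n - 1).toNat = n := by rw [Int.negSucc_eq]; omega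
      rw [h1, Nat.and_comm, Nat.and_two_pow_sub_one_eq_mod n 4]
      have := Nat.mod_lt n (show 0 < 16 by norm_num)
      rw [Int.negSucc_eq]
      omega

-- the table entry at a nibble index 0 ≤ l < 16 is the 8-pulse chunk of that nibble's 4 bits
theorem pv_nib_lookup (l : Int) (h0 : 0 ≤ l) (h1 : l < 16) :
    (PySem.List.pyGet? pvNibbleTable l).getD [] =
      [562, if PySem.Int.band (l >>> (0:Nat)) 1 ≠ 0 then 1687 else 562,
       562, if PySem.Int.band (l >>> (1:Nat)) 1 ≠ 0 then 1687 else 562,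
       562, if PySem.Int.band (l >>> (2:Nat)) 1 ≠ 0 then 1687 else 562,
       562, if PySem.Int.band (l >>> (3:Nat)) 1 ≠ 0 then 1687 else 562] := by
  interval_cases l <;> decide

theorem pv_bc0 (b : Int) (hb0 : 0 ≤ b) (hb : b < 256) :
    (PySem.Int.band (b >>> (0:Nat)) 1 ≠ 0) ↔ (PySem.Int.band ((b % 16) >>> (0:Nat)) 1 ≠ 0) := by
  rw [PySem.Int.band_one, PySem.Int.band_one,
    PySem.Int.mod_eq_emod_of_pos (by norm_num : (0:Int) < 2),
    PySem.Int.mod_eq_emod_of_pos (by norm_num : (0:Int) < 2)]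
  simp only [Int.shiftRight_eq_div_pow]
  norm_num
  try (constructor <;> intro h <;> omega)

theorem pv_bc1 (b : Int) (hb0 : 0 ≤ b) (hb : b < 256) :
    (PySem.Int.band (b >>> (1:Nat)) 1 ≠ 0) ↔ (PySem.Int.band ((b % 16) >>> (1:Nat)) 1 ≠ 0) := by
  rw [PySem.Int.band_one, PySem.Int.band_one,
    PySem.Int.mod_eq_emod_of_pos (by norm_num : (0:Int) < 2),
    PySem.Int.mod_eq_emod_of_pos (by norm_num : (0:Int) < 2)]
  simp only [Int.shiftRight_eq_div_pow]
  norm_num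
  try (constructor <;> intro h <;> omega)

theorem pv_bc2 (b : Int) (hb0 : 0 ≤ b) (hb : b < 256) :
    (PySem.Int.band (b >>> (2:Nat)) 1 ≠ 0) ↔ (PySem.Int.band ((b % 16) >>> (2:Nat)) 1 ≠ 0) := by
  rw [PySem.Int.band_one, PySem.Int.band_one,
    PySem.Int.mod_eq_emod_of_pos (by norm_num : (0:Int) < 2),
    PySem.Int.mod_eq_emod_of_pos (by norm_num : (0:Int) < 2)]
  simp only [Int.shiftRight_eq_div_pow]
  norm_num
  try (constructor <;> intro h <;> omega)

theorem pv_bc3 (b : Int) (hb0 : 0 ≤ b) (hb : b < 256) :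
    (PySem.Int.band (b >>> (3:Nat)) 1 ≠ 0) ↔ (PySem.Int.band ((b % 16) >>> (3:Nat)) 1 ≠ 0) := by
  rw [PySem.Int.band_one, PySem.Int.band_one,
    PySem.Int.mod_eq_emod_of_pos (by norm_num : (0:Int) < 2),
    PySem.Int.mod_eq_emod_of_pos (by norm_num : (0:Int) < 2)]
  simp only [Int.shiftRight_eq_div_pow]
  norm_num
  try (constructor <;> intro h <;> omega)

theorem pv_bc4 (b : Int) (hb0 : 0 ≤ b) (hb : b < 256) :
    (PySem.Int.band (b >>> (4:Nat)) 1 ≠ 0) ↔ (PySem.Int.band ((b >>> (4:Nat)) >>> (0:Nat)) 1 ≠ 0) := by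
  rw [PySem.Int.band_one, PySem.Int.band_one,
    PySem.Int.mod_eq_emod_of_pos (by norm_num : (0:Int) < 2),
    PySem.Int.mod_eq_emod_of_pos (by norm_num : (0:Int) < 2)]
  simp only [Int.shiftRight_eq_div_pow]
  norm_num
  try (constructor <;> intro h <;> omega)

theorem pv_bc5 (b : Int) (hb0 : 0 ≤ b) (hb : b < 256) :
    (PySem.Int.band (b >>> (5:Nat)) 1 ≠ 0) ↔ (PySem.Int.band ((b >>> (4:Nat)) >>> (1:Nat)) 1 ≠ 0) := by
  rw [PySem.Int.band_one, PySem.Int.band_one,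
    PySem.Int.mod_eq_emod_of_pos (by norm_num : (0:Int) < 2),
    PySem.Int.mod_eq_emod_of_pos (by norm_num : (0:Int) < 2)]
  simp only [Int.shiftRight_eq_div_pow]
  norm_num
  try (constructor <;> intro h <;> omega)

theorem pv_bc6 (b : Int) (hb0 : 0 ≤ b) (hb : b < 256) :
    (PySem.Int.band (b >>> (6:Nat)) 1 ≠ 0) ↔ (PySem.Int.band ((b >>> (4:Nat)) >>> (2:Nat)) 1 ≠ 0) := by
  rw [PySem.Int.band_one, PySem.Int.band_one,
    PySem.Int.mod_eq_emod_of_pos (by norm_num : (0:Int) < 2),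
    PySem.Int.mod_eq_emod_of_pos (by norm_num : (0:Int) < 2)]
  simp only [Int.shiftRight_eq_div_pow]
  norm_num
  try (constructor <;> intro h <;> omega)

theorem pv_bc7 (b : Int) (hb0 : 0 ≤ b) (hb : b < 256) :
    (PySem.Int.band (b >>> (7:Nat)) 1 ≠ 0) ↔ (PySem.Int.band ((b >>> (4:Nat)) >>> (3:Nat)) 1 ≠ 0) := by
  rw [PySem.Int.band_one, PySem.Int.band_one,
    PySem.Int.mod_eq_emod_of_pos (by norm_num : (0:Int) < 2),
    PySem.Int.mod_eq_emod_of_pos (by norm_num : (0:Int) < 2)]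
  simp only [Int.shiftRight_eq_div_pow]
  norm_num
  try (constructor <;> intro h <;> omega)

-- A's per-byte inner bit loop equals appending the two nibble-table chunks of that byte
theorem pv_perByte (acc : List Int) (b : Int) (hb0 : 0 ≤ b) (hb : b < 256) :
    (PySem.List.pyRange 0 8 1).foldl (fun (acc2 : List Int) (bit : Int) =>
      let acc2 := acc2 ++ [562]
      if PySem.Int.band (b >>> bit.toNat) 1 ≠ 0 then acc2 ++ [1687] else acc2 ++ [562]) acc
    = acc ++ ((PySem.List.pyGet? pvNibbleTable (PySem.Int.band b 15)).getD []
              ++ (PySem.List.pyGet? pvNibbleTable (b >>> (4:Nat))).getD []) := by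
  have hq0 : 0 ≤ b >>> (4:Nat) := by
    rw [Int.shiftRight_eq_div_pow]; positivity
  have hq : b >>> (4:Nat) < 16 := by
    rw [Int.shiftRight_eq_div_pow]; omega
  rw [pv_band15, pv_nib_lookup (b % 16) (by omega) (by omega),
      pv_nib_lookup (b >>> (4:Nat)) hq0 hq]
  have hstep : (fun (acc2 : List Int) (bit : Int) =>
        let acc2 := acc2 ++ [562]
        if PySem.Int.band (b >>> bit.toNat) 1 ≠ 0 then acc2 ++ [1687] else acc2 ++ [562])
      = (fun (acc2 : List Int) (bit : Int) =>
        acc2 ++ [562, if PySem.Int.band (b >>> bit.toNat) 1 ≠ 0 then 1687 else 562]) := by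
    funext acc2 bit; dsimp only
    by_cases h : PySem.Int.band (b >>> bit.toNat) 1 ≠ 0
    · rw [if_pos h, if_pos h]; simp
    · rw [if_neg h, if_neg h]; simp
  rw [hstep, PySem.List.foldl_append_eq_flatMap,
      show PySem.List.pyRange 0 8 1 = [0,1,2,3,4,5,6,7] from by decide]
  simp only [List.flatMap_cons, List.flatMap_nil, List.append_nil, Int.toNat_zero,
    Int.toNat_one, Int.reduceToNat]
  simp only [pv_bc0 b hb0 hb, pv_bc1 b hb0 hb, pv_bc2 b hb0 hb, pv_bc3 b hb0 hb,
    pv_bc4 b hb0 hb, pv_bc5 b hb0 hb, pv_bc6 b hb0 hb, pv_bc7 b hb0 hb]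
  simp

-- ===== VERDICT (by name: the statement is the Claim_ definition above) =====
theorem encode_nec_extended_py_spec : Claim_equal_encode_nec_extended_py := by
  intro address command _
  unfold Spec_encode_nec_extended_py encode_nec_extended_py encode_nec_extended_py_alt
  simp only [List.foldl_cons, List.foldl_nil, List.nil_append]
  rw [pv_perByte _ _ (by rw [pv_band255]; omega) (by rw [pv_band255]; omega),
      pv_perByte _ _ (by rw [pv_band255]; omega) (by rw [pv_band255]; omega),
      pv_perByte _ _ (by rw [pv_band255]; omega) (by rw [pv_band255]; omega),
      pv_perByte _ _ (by rw [pv_band255]; omega) (by rw [pv_band255]; omega)]
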